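-- pv_equiv track=rewrite | github.com/galactic-src/advent-20-python | 2015/day11/day11.py | got_two_pairs
-- ===== SOURCE A (Python) =====
-- def got_two_pairs(p):
--     found = False
--     prev = None
--     for c in p:
--         if prev == c:
--             if found:
--                 return True
--             else:
--                 found = True
--                 prev = None
--         else:
--             prev = c
--     else:
--         return False
-- ===== SOURCE B (Python) =====
-- def _after_first_pair(p):
--     for i in range(len(p) - 1):
--         if p[i] == p[i + 1]:
--             return p[i + 2:]
--     return None
--
-- def _has_pair(p):
--     return any(p[j] == p[j + 1] for j in range(len(p) - 1))
--
-- def got_two_pairs(p):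
--     rest = _after_first_pair(p)
--     return rest is not None and _has_pair(rest)
-- ===== Notes on version B (the rewrite author's own statement) =====
-- stated objective: simpler
-- what changed: Replaces A's single threaded-state scan (found flag + resettable prev) with two independent search phases: find the earliest adjacent equal pair, then check the suffix after it for any second pair.
import Mathlib
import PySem

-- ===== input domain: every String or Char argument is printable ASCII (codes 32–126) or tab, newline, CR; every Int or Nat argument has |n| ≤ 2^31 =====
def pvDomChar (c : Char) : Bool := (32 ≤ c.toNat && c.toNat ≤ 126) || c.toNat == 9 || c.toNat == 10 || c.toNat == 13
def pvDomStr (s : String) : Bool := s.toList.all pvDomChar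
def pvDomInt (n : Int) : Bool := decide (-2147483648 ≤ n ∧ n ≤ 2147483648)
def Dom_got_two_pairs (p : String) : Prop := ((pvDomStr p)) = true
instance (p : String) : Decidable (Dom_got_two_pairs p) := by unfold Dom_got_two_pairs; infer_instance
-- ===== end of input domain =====

-- B replaces A's single threaded-state scan with two independent search phases (simpler decomposition; same cost).
-- ===== PORT A =====
-- A's loop: state (found, prev); returns true at the second pair, prev resets after a pair.
def gtpGoA : List Char → Bool → Option Char → Bool
  | [], _, _ => false
  | c :: rest, found, prev =>
      if prev = some c then
        if found then true else gtpGoA rest true none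
      else gtpGoA rest found (some c)

def got_two_pairs (p : String) : Bool := gtpGoA p.toList false none

-- ===== PORT B =====
-- B phase 1: scan for the earliest adjacent equal pair; return the suffix after it (none if no pair).
def gtpAfterFirstPair : List Char → Option (List Char)
  | a :: b :: rest => if a = b then some rest else gtpAfterFirstPair (b :: rest)
  | _ => none

-- B phase 2: does any adjacent equal pair exist?
def gtpHasPair : List Char → Bool
  | a :: b :: rest => a = b || gtpHasPair (b :: rest)
  | _ => false

def got_two_pairs_alt (p : String) : Bool :=
  match gtpAfterFirstPair p.toList with
  | none => false
  | some rest => gtpHasPair rest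

-- ===== PRECONDITION & SPEC =====
def Spec_got_two_pairs (p : String) (out : Bool) : Prop := out = got_two_pairs_alt p
instance (p : String) (out : Bool) : Decidable (Spec_got_two_pairs p out) := by unfold Spec_got_two_pairs; infer_instance

-- ===== CLAIM (what is proved, stated in full; the proofs are below) =====
def Claim_equal_got_two_pairs : Prop := ∀ (p : String), Dom_got_two_pairs p → Spec_got_two_pairs p (got_two_pairs p)

-- ===== LEMMAS AND PROOFS =====
-- A's loop with found = true and pending prev x behaves as "any pair in x::l".
theorem gtpGoA_true_some (l : List Char) : ∀ x, gtpGoA l true (some x) = gtpHasPair (x :: l) := by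
  induction l with
  | nil => intro x; simp [gtpGoA, gtpHasPair]
  | cons c rest ih =>
      intro x
      by_cases h : x = c
      · simp [gtpGoA, gtpHasPair, h]
      · simp [gtpGoA, gtpHasPair, h, ih c]

theorem gtpGoA_true_none (l : List Char) : gtpGoA l true none = gtpHasPair l := by
  cases l with
  | nil => rfl
  | cons c rest => simpa [gtpGoA] using gtpGoA_true_some rest c

-- A's loop with found = false and pending prev x matches B's two phases on x::l.
theorem gtpGoA_false_some (l : List Char) : ∀ x,
    gtpGoA l false (some x) =
      (match gtpAfterFirstPair (x :: l) with
       | none => false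
       | some rest => gtpHasPair rest) := by
  induction l with
  | nil => intro x; simp [gtpGoA, gtpAfterFirstPair]
  | cons c rest ih =>
      intro x
      by_cases h : x = c
      · simp [gtpGoA, gtpAfterFirstPair, h, gtpGoA_true_none]
      · simp [gtpGoA, gtpAfterFirstPair, h, ih c]

-- ===== VERDICT (by name: the statement is the Claim_ definition above) =====
theorem got_two_pairs_spec : Claim_equal_got_two_pairs := by
  intro p _
  unfold Spec_got_two_pairs got_two_pairs got_two_pairs_alt
  cases hl : p.toList with
  | nil => rfl
  | cons c rest => simpa [gtpGoA, gtpAfterFirstPair] using gtpGoA_false_some rest c
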